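-- pv_equiv track=rewrite | github.com/davebrent/dbp | scripts/rhythms.py | measure_syncopation
-- ===== SOURCE A (Python) =====
-- import collections
--
-- def interonset_intervals(rhythm):
--     """Calculate adjacent inter-onset intervals in a rhythm.
--
--     If the rhythm starts at 0, the rhythm will be rotated to start on
--     a pulse.
--
--     >>> interonset_intervals([1, 0, 0, 1, 0, 0, 1, 0])
--     [3, 3, 2]
--     >>> interonset_intervals([1, 1, 1, 1, 1, 1, 1, 1])
--     [1, 1, 1, 1, 1, 1, 1, 1]
--
--     """
--     start = rhythm.index(1)
--     rhythm = collections.deque(rhythm)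
--     rhythm.rotate(-start)
--
--     result = []
--     for event in rhythm:
--         if event == 1:
--             result.append(1)
--         else:
--             result[-1] += 1
--     return result
--
-- def measure_syncopation(rhythm):
--     """Returns keiths measure of syncopation for a rhythm.
--
--     (Godfried Toussaint, Geometry of musical rhythm. Page 70)
--
--     >>> measure_syncopation([1, 0, 0, 0, 1, 0, 0, 0, 1, 0, 1, 0, 1, 0, 0, 0])
--     0
--     >>> measure_syncopation([1, 0, 0, 1, 0, 0, 1, 0, 0, 0, 1, 0, 1, 0, 0, 0])
--     2
--
--     """
--     measure = 0
--     onset_durations = interonset_intervals(rhythm)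
--     locations = [s for s, p in enumerate(rhythm) if p == 1]
--     round_down = lambda num, divisor: num - (num % divisor)
--     for location, duration in zip(locations, onset_durations):
--         if location % round_down(duration, 2) != 0:
--             measure += 1
--     return measure
-- ===== SOURCE B (Python) =====
-- def measure_syncopation(rhythm):
--     """Keith's measure of syncopation, computed from onset indices directly."""
--     locations = [i for i, p in enumerate(rhythm) if p == 1]
--     if not locations:
--         raise ValueError("1 is not in list")
--     durations = [b - a for a, b in zip(locations, locations[1:])]
--     durations.append(len(rhythm) - locations[-1] + locations[0])
--     return sum(
--         1 for location, duration in zip(locations, durations)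
--         if location % (duration - duration % 2) != 0
--     )
-- ===== Notes on version B (the rewrite author's own statement) =====
-- stated objective: simpler
-- what changed: Inter-onset durations are computed directly as consecutive differences of the onset-index list plus a wraparound term, replacing the deque rotation and the last-element-accumulation loop; the syncopation count becomes a sum over a generator.
import Mathlib
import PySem

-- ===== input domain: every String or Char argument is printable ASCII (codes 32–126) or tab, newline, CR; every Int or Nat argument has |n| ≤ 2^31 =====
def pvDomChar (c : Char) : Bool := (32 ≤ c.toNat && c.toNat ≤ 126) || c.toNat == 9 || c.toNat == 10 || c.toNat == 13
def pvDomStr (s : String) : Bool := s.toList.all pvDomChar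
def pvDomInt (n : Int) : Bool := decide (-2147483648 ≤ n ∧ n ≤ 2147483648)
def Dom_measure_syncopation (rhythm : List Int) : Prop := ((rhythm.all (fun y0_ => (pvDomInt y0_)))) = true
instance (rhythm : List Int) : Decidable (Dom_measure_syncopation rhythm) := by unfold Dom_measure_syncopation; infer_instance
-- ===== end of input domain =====

-- B replaces A's deque rotation and last-element-accumulation loop by consecutive
-- differences of the onset-index list plus a wraparound term (objective: simpler).

-- Shared helper: the comprehension [i for i, p in enumerate(rhythm) if p == 1],
-- which appears verbatim in BOTH Python sources.
def onsetLocs : List Int → Int → List Int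
  | [], _ => []
  | x :: xs, k => if x = 1 then k :: onsetLocs xs (k + 1) else onsetLocs xs (k + 1)

-- ===== PORT A =====
-- result[-1] += 1 : increment the last element (Python raises IndexError on an
-- empty list; unreachable here because the rotated rhythm starts on an onset)
def incLast : List Int → List Int
  | [] => []
  | [x] => [x + 1]
  | x :: y :: xs => x :: incLast (y :: xs)

-- the 'for event in rhythm: …' accumulation loop of interonset_intervals
def ioiLoop : List Int → List Int → List Int
  | acc, [] => acc
  | acc, e :: es => if e = 1 then ioiLoop (acc ++ [1]) es else ioiLoop (incLast acc) es

def interonset_intervals (rhythm : List Int) : List Int :=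
  match PySem.List.index? rhythm 1 with
  | none => []               -- Python raises ValueError here (excluded by Pre_)
  | some start =>
      let rot := rhythm.drop start ++ rhythm.take start   -- deque(rhythm).rotate(-start)
      ioiLoop [] rot

def measure_syncopation (rhythm : List Int) : Int :=
  let onset_durations := interonset_intervals rhythm
  let locations := onsetLocs rhythm 0
  -- round_down num divisor = num - num % divisor; Python raises ZeroDivisionError
  -- when round_down(duration, 2) = 0 (excluded by Pre_)
  (locations.zip onset_durations).foldl
    (fun measure p =>
      if PySem.Int.mod p.1 (p.2 - PySem.Int.mod p.2 2) ≠ 0 then measure + 1 else measure) 0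

-- ===== PORT B =====
def measure_syncopation_alt (rhythm : List Int) : Int :=
  let locations := onsetLocs rhythm 0
  match locations with
  | [] => 0                  -- Python raises ValueError here (excluded by Pre_)
  | l0 :: rest =>
      let durations :=
        (((l0 :: rest).zip rest).map (fun p => p.2 - p.1))    -- zip(locations, locations[1:])
          ++ [(rhythm.length : Int) - (l0 :: rest).getLast (by simp) + l0]
      Int.ofNat (((l0 :: rest).zip durations).countP
        (fun p => PySem.Int.mod p.1 (p.2 - PySem.Int.mod p.2 2) != 0))

-- ===== PRECONDITION & SPEC =====
-- Pre_ excludes exactly the inputs on which A raises: rhythms with no onset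
-- (rhythm.index(1) raises ValueError) and rhythms with two cyclically adjacent
-- onsets, i.e. an inter-onset duration of 1, where round_down(1, 2) = 0 makes
-- 'location % 0' raise ZeroDivisionError.
def Pre_measure_syncopation (rhythm : List Int) : Prop :=
  (1 : Int) ∈ rhythm ∧
    ∀ i < rhythm.length,
      ¬ (rhythm.getD i 0 = 1 ∧ rhythm.getD ((i + 1) % rhythm.length) 0 = 1)
instance (rhythm : List Int) : Decidable (Pre_measure_syncopation rhythm) := by
  unfold Pre_measure_syncopation; infer_instance

def pvWitness_measure_syncopation : List Int := [1, 0, 0, 1, 0, 0, 1, 0]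

def Spec_measure_syncopation (rhythm : List Int) (out : Int) : Prop := out = measure_syncopation_alt rhythm
instance (rhythm : List Int) (out : Int) : Decidable (Spec_measure_syncopation rhythm out) := by
  unfold Spec_measure_syncopation; infer_instance

-- ===== CLAIM (what is proved, stated in full; the proofs are below) =====
def Claim_equal_measure_syncopation : Prop := ∀ (rhythm : List Int), Dom_measure_syncopation rhythm → Pre_measure_syncopation rhythm → Spec_measure_syncopation rhythm (measure_syncopation rhythm)

-- ===== LEMMAS AND PROOFS =====

-- shifting the running index of onsetLocs shifts every reported location
theorem onsetLocs_shift (xs : List Int) (a : Int) :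
    ∀ k, onsetLocs xs (k + a) = (onsetLocs xs k).map (· + a) := by
  induction xs with
  | nil => intro k; simp [onsetLocs]
  | cons x xs ih =>
      intro k
      by_cases hx : x = 1 <;>
        simp [onsetLocs, hx, show k + a + 1 = (k + 1) + a by ring, ih (k + 1)]

theorem onsetLocs_append (xs ys : List Int) :
    ∀ k, onsetLocs (xs ++ ys) k = onsetLocs xs k ++ onsetLocs ys (k + xs.length) := by
  induction xs with
  | nil => intro k; simp [onsetLocs]
  | cons x xs ih =>
      intro k
      by_cases hx : x = 1 <;>
        simp [onsetLocs, hx, ih (k + 1),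
          show k + 1 + (xs.length : Int) = k + ((xs.length : Int) + 1) by ring]

theorem onsetLocs_eq_nil (xs : List Int) (h : (1 : Int) ∉ xs) : ∀ k, onsetLocs xs k = [] := by
  induction xs with
  | nil => intro k; simp [onsetLocs]
  | cons x xs ih =>
      intro k
      have hx : x ≠ 1 := fun he => h (by simp [he])
      simp [onsetLocs, hx, ih (fun hm => h (List.mem_cons_of_mem _ hm))]

-- Python's 'result[-1] += 1' on acc ++ [v]
theorem incLast_append (acc : List Int) (v : Int) : incLast (acc ++ [v]) = acc ++ [v + 1] := by
  induction acc with
  | nil => simp [incLast]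
  | cons x t ih =>
      cases t with
      | nil => simp [incLast]
      | cons y t' => simpa [incLast] using ih

-- single-duration form of the accumulation loop
def ioiGo (v : Int) : List Int → List Int
  | [] => [v]
  | e :: es => if e = 1 then v :: ioiGo 1 es else ioiGo (v + 1) es

theorem ioiLoop_acc (es : List Int) :
    ∀ (acc : List Int) (v : Int), ioiLoop (acc ++ [v]) es = acc ++ ioiGo v es := by
  induction es with
  | nil => intro acc v; simp [ioiLoop, ioiGo]
  | cons e es ih =>
      intro acc v
      by_cases he : e = 1
      · subst he
        have h1 : ioiLoop (acc ++ [v]) (1 :: es) = ioiLoop ((acc ++ [v]) ++ [1]) es := by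
          simp [ioiLoop]
        rw [h1, ih (acc ++ [v]) 1]
        simp [ioiGo]
      · have h1 : ioiLoop (acc ++ [v]) (e :: es) = ioiLoop (incLast (acc ++ [v])) es := by
          simp [ioiLoop, he]
        rw [h1, incLast_append, ih acc (v + 1)]
        simp [ioiGo, he]

-- consecutive differences from prev through js, closed by n - last
def cd (prev : Int) : List Int → Int → List Int
  | [], n => [n - prev]
  | j :: js, n => (j - prev) :: cd j js n

theorem cd_shift (js : List Int) :
    ∀ (p c n : Int), cd (p + c) (js.map (· + c)) (n + c) = cd p js n := by
  induction js with
  | nil =>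
      intro p c n
      simp only [List.map_nil, cd]
      congr 1
      ring
  | cons j js ih =>
      intro p c n
      simp only [List.map_cons, cd]
      rw [ih j c n]
      congr 1
      ring

-- intervals expressed through the onset locations of the scanned list
def durFromLocs (v : Int) (L : List Int) (n : Int) : List Int :=
  match L with
  | [] => [v + n]
  | j :: js => (v + j) :: cd j js n

theorem ioiGo_char (es : List Int) :
    ∀ v : Int, ioiGo v es = durFromLocs v (onsetLocs es 0) (es.length : Int) := by
  induction es with
  | nil => intro v; simp [ioiGo, onsetLocs, durFromLocs]
  | cons e es ih =>
      intro v
      have hshift : onsetLocs es 1 = (onsetLocs es 0).map (· + 1) := by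
        simpa using onsetLocs_shift es 1 0
      have hlen : (((e :: es).length : Nat) : Int) = (es.length : Int) + 1 := by
        simp [List.length_cons]
      by_cases he : e = 1
      · subst he
        rw [show ioiGo v (1 :: es) = v :: ioiGo 1 es from by simp [ioiGo]]
        rw [show onsetLocs (1 :: es) 0 = 0 :: onsetLocs es 1 from by simp [onsetLocs]]
        rw [hshift, ih 1, hlen]
        cases hL : onsetLocs es 0 with
        | nil =>
            simp only [List.map_nil, durFromLocs, cd]
            refine congrArg₂ _ ?_ (congrArg₂ _ ?_ rfl) <;> ring
        | cons j js =>
            simp only [List.map_cons, durFromLocs, cd,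
              cd_shift js j 1 (es.length : Int)]
            refine congrArg₂ _ ?_ (congrArg₂ _ ?_ rfl) <;> ring
      · rw [show ioiGo v (e :: es) = ioiGo (v + 1) es from by simp [ioiGo, he]]
        rw [show onsetLocs (e :: es) 0 = onsetLocs es 1 from by simp [onsetLocs, he]]
        rw [hshift, ih (v + 1), hlen]
        cases hL : onsetLocs es 0 with
        | nil =>
            simp only [List.map_nil, durFromLocs]
            refine congrArg₂ _ ?_ rfl
            ring
        | cons j js =>
            simp only [List.map_cons, durFromLocs,
              cd_shift js j 1 (es.length : Int)]
            refine congrArg₂ _ ?_ rfl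
            ring

-- B's zip-differences plus wraparound term, folded into cd
theorem diffs_last_eq_cd (js : List Int) :
    ∀ (j n : Int) (h : (j :: js) ≠ []),
      (((j :: js).zip js).map (fun p => p.2 - p.1)) ++ [n - (j :: js).getLast h] = cd j js n := by
  induction js with
  | nil => intro j n h; simp [cd]
  | cons j' js' ih =>
      intro j n h
      rw [List.getLast_cons_cons]
      simp only [List.zip_cons_cons, List.map_cons, List.cons_append]
      rw [ih j' n (by simp)]
      rfl

-- the onset-location list of a rhythm decomposed at its first onset
theorem locs_decomp (pre suf : List Int) (hpre : (1 : Int) ∉ pre) :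
    onsetLocs (pre ++ 1 :: suf) 0 =
      (pre.length : Int) :: (onsetLocs suf 0).map (· + ((pre.length : Int) + 1)) := by
  rw [onsetLocs_append pre (1 :: suf) 0, onsetLocs_eq_nil pre hpre 0]
  simp only [List.nil_append, onsetLocs, zero_add]
  simpa using onsetLocs_shift suf ((pre.length : Int) + 1) 0

-- main lemma: under Pre_, A's interval list equals B's duration list
theorem durations_eq (pre suf : List Int) (hpre : (1 : Int) ∉ pre)
    (l0 : Int) (rest : List Int)
    (hL : onsetLocs (pre ++ 1 :: suf) 0 = l0 :: rest) :
    interonset_intervals (pre ++ 1 :: suf) =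
      (((l0 :: rest).zip rest).map (fun p => p.2 - p.1))
        ++ [(((pre ++ 1 :: suf).length : Nat) : Int) - (l0 :: rest).getLast (by simp) + l0] := by
  have hdec := locs_decomp pre suf hpre
  rw [hdec] at hL
  obtain ⟨hl0, hrest⟩ : l0 = (pre.length : Int) ∧
      rest = (onsetLocs suf 0).map (· + ((pre.length : Int) + 1)) := by
    have := hL.symm
    exact ⟨(List.cons.injEq _ _ _ _ ▸ this).1, (List.cons.injEq _ _ _ _ ▸ this).2⟩
  subst hl0; subst hrest
  set s : Int := (pre.length : Int) with hs
  -- A side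
  have hidx : PySem.List.index? (pre ++ 1 :: suf) 1 = some pre.length :=
    (PySem.List.index?_eq_some_iff _ _ _).mpr ⟨pre, suf, rfl, rfl, hpre⟩
  have hrot : (pre ++ 1 :: suf).drop pre.length ++ (pre ++ 1 :: suf).take pre.length
      = 1 :: (suf ++ pre) := by
    rw [List.drop_left, List.take_left]; simp
  have hioi : interonset_intervals (pre ++ 1 :: suf) =
      durFromLocs 1 (onsetLocs suf 0) ((suf.length : Int) + s) := by
    rw [interonset_intervals, hidx]
    simp only [hrot]
    have hstart : ioiLoop [] (1 :: (suf ++ pre)) = ioiGo 1 (suf ++ pre) := by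
      have h0 := ioiLoop_acc (suf ++ pre) [] 1
      simpa [ioiLoop] using h0
    rw [hstart, ioiGo_char]
    rw [onsetLocs_append suf pre 0, onsetLocs_eq_nil pre hpre _]
    simp only [List.append_nil, List.length_append]
    congr 1
  rw [hioi]
  -- B side: fold the differences-plus-wrap expression into cd, then unshift
  have hlen : (((pre ++ 1 :: suf).length : Nat) : Int) = (suf.length : Int) + s + 1 := by
    simp [hs]
    ring
  cases hL0 : onsetLocs suf 0 with
  | nil =>
      simp only [List.map_nil, durFromLocs, List.zip_nil_right,
        List.getLast_singleton, List.nil_append, hlen]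
      all_goals refine congrArg₂ _ ?_ rfl
      all_goals ring
  | cons j js =>
      simp only [List.map_cons, durFromLocs, List.zip_cons_cons, List.cons_append]
      refine congrArg₂ _ (by ring) ?_
      rw [List.getLast_cons_cons]
      have hcd := cd_shift js j (s + 1) ((suf.length : Int) + s)
      have hgl := diffs_last_eq_cd (js.map (· + (s + 1))) (j + (s + 1))
        ((((suf.length : Int) + s) + (s + 1))) (by simp)
      rw [hcd] at hgl
      have hlast : (((pre ++ 1 :: suf).length : Nat) : Int)
            - ((j + (s + 1)) :: js.map (· + (s + 1))).getLast (by simp) + s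
          = (((suf.length : Int) + s) + (s + 1))
            - ((j + (s + 1)) :: js.map (· + (s + 1))).getLast (by simp) := by
        rw [hlen]; ring
      rw [hlast]
      exact hgl.symm

-- Pre_ gives an onset, hence a pre/suf decomposition at the first onset
theorem exists_decomp (rhythm : List Int) (h : (1 : Int) ∈ rhythm) :
    ∃ pre suf, rhythm = pre ++ 1 :: suf ∧ (1 : Int) ∉ pre := by
  obtain ⟨k, hk⟩ := Option.isSome_iff_exists.mp
    ((PySem.List.index?_isSome_iff rhythm 1).mpr h)
  obtain ⟨pre, suf, hdec, _, hnot⟩ := (PySem.List.index?_eq_some_iff rhythm 1 k).mp hk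
  exact ⟨pre, suf, hdec, hnot⟩

-- the two syncopation loops count the same pairs
theorem count_loops_eq (L D : List Int) :
    (L.zip D).foldl
      (fun measure p =>
        if PySem.Int.mod p.1 (p.2 - PySem.Int.mod p.2 2) ≠ 0 then measure + 1 else measure) 0
    = Int.ofNat ((L.zip D).countP
        (fun p => PySem.Int.mod p.1 (p.2 - PySem.Int.mod p.2 2) != 0)) := by
  have hfun : (fun (measure : Int) (p : Int × Int) =>
      if PySem.Int.mod p.1 (p.2 - PySem.Int.mod p.2 2) ≠ 0 then measure + 1 else measure)
      = (fun (measure : Int) (p : Int × Int) =>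
      if (PySem.Int.mod p.1 (p.2 - PySem.Int.mod p.2 2) != 0) = true then measure + 1
      else measure) := by
    funext m p
    simp
  rw [hfun, PySem.List.foldl_count_if]
  simp [Int.ofNat_eq_natCast]

-- ===== VERDICT (by name: the statement is the Claim_ definition above) =====
theorem measure_syncopation_spec : Claim_equal_measure_syncopation := by
  intro rhythm _hdom hpre
  obtain ⟨pre, suf, hdec, hnot⟩ := exists_decomp rhythm hpre.1
  subst hdec
  show measure_syncopation _ = measure_syncopation_alt _
  have hL := locs_decomp pre suf hnot
  simp only [measure_syncopation, measure_syncopation_alt, hL]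
  rw [durations_eq pre suf hnot _ _ hL]
  exact count_loops_eq _ _
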